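-- pv_equiv track=rewrite | github.com/donc0n/programmers-challenges | Heap/solution3.py | solution
-- ===== SOURCE A (Python) =====
-- import heapq as hq
--
-- class Dpq:
--     def __init__(self):
--         self.heap = [] # 최소 힙
--     def push(self, value):
--         hq.heappush(self.heap, value)
--     def pop_min(self):
--         if not self.heap:
--             return "error1"
--         return hq.heappop(self.heap)
--     def pop_max(self): # 최소 힙을 최대 힙으로 만들어 최대값을 pop한 후 최소힙을 돌려놓는다.
--         if not self.heap:
--             return "error2"
--         self.heap = list(map(lambda x: -x, self.heap))
--         hq.heapify(self.heap)
--         max_val =  -hq.heappop(self.heap)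
--         self.heap = list(map(lambda x: -x, self.heap))
--         hq.heapify(self.heap)
--         return max_val
--     def __len__(self):
--         return len(self.heap)
--     def min(self):
--         return min(self.heap)
--     def max(self):
--         return max(self.heap)
--
-- def solution(operations):
--     dpq = Dpq()
--     answer = []
--     for op in operations: # 명령어 파싱
--         args = op.split(" ")
--         if args[0] == 'I':
--             dpq.push(int(args[1]))
--         elif args[0] == 'D':
--             if args[1] == '-1':
--                 dpq.pop_min()
--             elif args[1] == '1':
--                 dpq.pop_max()
--     if len(dpq) == 0:
--         return [0, 0]
--     return [dpq.max(), dpq.min()]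
-- ===== SOURCE B (Python) =====
-- def solution(operations):
--     vals = []
--     for op in operations:
--         args = op.split(" ")
--         if args[0] == 'I':
--             vals.append(int(args[1]))
--         elif args[0] == 'D' and vals:
--             if args[1] == '-1':
--                 vals.remove(min(vals))
--             elif args[1] == '1':
--                 vals.remove(max(vals))
--     if not vals:
--         return [0, 0]
--     return [max(vals), min(vals)]
-- ===== Notes on version B (the rewrite author's own statement) =====
-- stated objective: simpler
-- what changed: Replaces the binary-heap machinery (heappush/heappop plus negate-heapify-pop-negate-heapify for delete-max) by a plain list from which min(vals)/max(vals) is removed directly, since only the final [max,min] of the remaining multiset matters.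
import Mathlib
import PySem

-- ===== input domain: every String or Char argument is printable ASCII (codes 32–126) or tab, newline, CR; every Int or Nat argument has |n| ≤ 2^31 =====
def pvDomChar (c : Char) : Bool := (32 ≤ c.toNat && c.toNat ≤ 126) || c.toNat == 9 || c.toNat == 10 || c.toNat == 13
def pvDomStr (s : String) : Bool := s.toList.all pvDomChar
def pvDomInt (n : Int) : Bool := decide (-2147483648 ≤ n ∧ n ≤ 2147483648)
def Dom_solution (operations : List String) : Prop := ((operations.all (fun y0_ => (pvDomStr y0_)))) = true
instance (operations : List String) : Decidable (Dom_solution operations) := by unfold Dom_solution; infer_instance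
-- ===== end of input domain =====

-- B replaces A's binary-heap machinery by a plain list from which the min/max value is
-- removed directly (only the final [max, min] of the remaining multiset matters): simpler.

-- ===== PORT A =====
-- heapq is not covered by PySem, so CPython's heapq (_siftdown, _siftup, heappush,
-- heappop, heapify) is ported by hand below, step for step, exact for Int elements.
-- `hget l i` is the in-range read `l[i]` (every heapq access is in range, so the
-- default 0 is never the value read).
def hget (l : List Int) (i : Nat) : Int := l.getD i 0

-- CPython _siftdown's while-loop; `newitem = heap[pos]` is read once before the loop
-- and carried here as the argument `newitem`.
def siftdownLoop (l : List Int) (startpos pos : Nat) (newitem : Int) : List Int :=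
  -- locals inlined: parentpos = (pos - 1) >> 1, parent = heap[parentpos]
  if _h : startpos < pos then
    if newitem < hget l ((pos - 1) / 2) then
      siftdownLoop (l.set pos (hget l ((pos - 1) / 2))) startpos ((pos - 1) / 2) newitem
    else
      l.set pos newitem            -- break; heap[pos] = newitem
  else
    l.set pos newitem              -- heap[pos] = newitem
termination_by pos
decreasing_by exact lt_of_le_of_lt (Nat.div_le_self _ _) (by omega)

-- _siftdown(heap, startpos, pos)
def siftdown (l : List Int) (startpos pos : Nat) : List Int :=
  siftdownLoop l startpos pos (hget l pos)

-- CPython _siftup's while-loop (childpos = 2*pos+1; pick the smaller child, move it up,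
-- descend; at the bottom write newitem and _siftdown back up to startpos).
-- the childpos update inside _siftup's loop: move to rightpos = childpos + 1 when it
-- exists and not heap[childpos] < heap[rightpos]  (locals childpos/rightpos inlined)
def childSel (l : List Int) (pos : Nat) : Nat :=
  if 2 * pos + 1 + 1 < l.length ∧ ¬ hget l (2 * pos + 1) < hget l (2 * pos + 1 + 1) then
    2 * pos + 1 + 1
  else
    2 * pos + 1

def siftupLoop (l : List Int) (startpos pos : Nat) (newitem : Int) : List Int :=
  if _h : 2 * pos + 1 < l.length then
    siftupLoop (l.set pos (hget l (childSel l pos))) startpos (childSel l pos) newitem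
  else
    -- heap[pos] = newitem; _siftdown(heap, startpos, pos)
    siftdownLoop (l.set pos newitem) startpos pos newitem
termination_by l.length - pos
decreasing_by simp only [List.length_set, childSel]; split <;> omega

-- _siftup(heap, pos): newitem = heap[pos], startpos = pos
def siftup (l : List Int) (pos : Nat) : List Int :=
  siftupLoop l pos pos (hget l pos)

-- hq.heappush: heap.append(item); _siftdown(heap, 0, len(heap)-1)
def heappush (l : List Int) (item : Int) : List Int :=
  siftdown (l ++ [item]) 0 l.length

-- hq.heappop: lastelt = heap.pop(); if heap: heap[0] = lastelt; _siftup(heap, 0).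
-- The popped item is discarded by every caller in `solution`, so only the resulting
-- heap is returned here.
def heappop (l : List Int) : List Int :=
  -- locals inlined: lastelt = heap.pop() is hget l (l.length - 1), rest = l.dropLast
  if l.dropLast ≠ [] then siftup (l.dropLast.set 0 (hget l (l.length - 1))) 0 else l.dropLast

-- hq.heapify: for i in reversed(range(n//2)): _siftup(x, i)
def heapify (l : List Int) : List Int :=
  (List.range (l.length / 2)).reverse.foldl (fun h i => siftup h i) l

-- Dpq.push
def dpqPush (heap : List Int) (value : Int) : List Int := heappush heap value

-- Dpq.pop_min ("error1" / the popped value are discarded by `solution`)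
def dpqPopMin (heap : List Int) : List Int :=
  if heap = [] then heap else heappop heap

-- Dpq.pop_max: negate, heapify, heappop (max_val is discarded by `solution`),
-- negate back, heapify
def dpqPopMax (heap : List Int) : List Int :=
  if heap = [] then heap
  else
    let h1 := heapify (heap.map (fun x => -x))
    let h2 := heappop h1
    heapify (h2.map (fun x => -x))

-- one iteration of solution's for-loop (args[1] IndexError / int() ValueError are
-- excluded by Pre_solution; those match arms are unreachable under it)
def stepA (heap : List Int) (op : String) : List Int :=
  let args := (PySem.Str.split? op " ").getD []      -- op.split(" "); sep ≠ "", so some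
  if PySem.List.pyGetD args 0 "" = "I" then
    match PySem.List.pyGet? args 1 with
    | none => heap
    | some s =>
      match PySem.Int.ofStr? s with
      | none => heap
      | some v => dpqPush heap v
  else if PySem.List.pyGetD args 0 "" = "D" then
    match PySem.List.pyGet? args 1 with
    | none => heap
    | some s => if s = "-1" then dpqPopMin heap else if s = "1" then dpqPopMax heap else heap
  else heap

def solution (operations : List String) : List Int :=
  let heap := operations.foldl stepA []
  if heap.length = 0 then [0, 0]
  else [(PySem.List.max? heap (fun x => x)).getD 0, (PySem.List.min? heap (fun x => x)).getD 0]

-- ===== PORT B =====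
-- one iteration of B's for-loop: plain list, remove min/max value directly
def stepB (vals : List Int) (op : String) : List Int :=
  let args := (PySem.Str.split? op " ").getD []
  if PySem.List.pyGetD args 0 "" = "I" then
    match PySem.List.pyGet? args 1 with
    | none => vals
    | some s =>
      match PySem.Int.ofStr? s with
      | none => vals
      | some v => vals ++ [v]
  else if PySem.List.pyGetD args 0 "" = "D" ∧ vals ≠ [] then
    match PySem.List.pyGet? args 1 with
    | none => vals
    | some s =>
      if s = "-1" then
        match PySem.List.min? vals (fun x => x) with
        | none => vals
        | some m => (PySem.List.remove? vals m).getD vals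
      else if s = "1" then
        match PySem.List.max? vals (fun x => x) with
        | none => vals
        | some m => (PySem.List.remove? vals m).getD vals
      else vals
  else vals

def solution_alt (operations : List String) : List Int :=
  let vals := operations.foldl stepB []
  if vals = [] then [0, 0]
  else [(PySem.List.max? vals (fun x => x)).getD 0, (PySem.List.min? vals (fun x => x)).getD 0]

-- ===== PRECONDITION & SPEC =====
-- Pre_ excludes exactly the operations on which A raises: an 'I'/'D' op without a second
-- token (IndexError on args[1]) and an 'I' op whose second token int() rejects (ValueError).
def Pre_solution (operations : List String) : Prop :=
  ∀ op ∈ operations,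
    (PySem.List.pyGetD ((PySem.Str.split? op " ").getD []) 0 "" = "I" →
        2 ≤ ((PySem.Str.split? op " ").getD []).length ∧
        (PySem.Int.ofStr? (PySem.List.pyGetD ((PySem.Str.split? op " ").getD []) 1 "")).isSome = true) ∧
    (PySem.List.pyGetD ((PySem.Str.split? op " ").getD []) 0 "" = "D" →
        2 ≤ ((PySem.Str.split? op " ").getD []).length)
instance (operations : List String) : Decidable (Pre_solution operations) := by
  unfold Pre_solution; infer_instance

def pvWitness_solution : List String := ["I 5", "I 2", "D 1", "I -3", "D -1", "I 7"]

def Spec_solution (operations : List String) (out : List Int) : Prop := out = solution_alt operations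
instance (operations : List String) (out : List Int) : Decidable (Spec_solution operations out) := by
  unfold Spec_solution; infer_instance

-- ===== CLAIM (what is proved, stated in full; the proofs are below) =====
def Claim_equal_solution : Prop := ∀ (operations : List String), Dom_solution operations → Pre_solution operations → Spec_solution operations (solution operations)

-- ===== LEMMAS AND PROOFS =====

-- parent index in a binary heap
def par (j : Nat) : Nat := (j - 1) / 2

-- heap property restricted to edges whose parent index is ≥ s
def IsHeapFrom (l : List Int) (s : Nat) : Prop :=
  ∀ j, 0 < j → j < l.length → s ≤ par j → hget l (par j) ≤ hget l j

-- p lies in the subtree rooted at s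
def inSub (s : Nat) : Nat → Prop := fun p =>
  if p = s then True else if p < s then False else inSub s (par p)
termination_by p => p
decreasing_by simp only [par]; omega

theorem inSub_self (s : Nat) : inSub s s := by rw [inSub]; simp

theorem inSub_ge {s p : Nat} (h : inSub s p) : s ≤ p := by
  induction p using Nat.strong_induction_on with
  | _ p ih =>
    rw [inSub] at h
    split at h
    · omega
    · split at h
      · exact absurd h id
      · omega

theorem inSub_zero (p : Nat) : inSub 0 p := by
  induction p using Nat.strong_induction_on with
  | _ p ih =>
    rw [inSub]
    split
    · trivial
    · split
      · omega
      · exact ih (par p) (by simp only [par]; omega)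

theorem inSub_step {s p : Nat} (h : inSub s p) (hne : p ≠ s) : s ≤ par p ∧ inSub s (par p) := by
  rw [inSub] at h
  split at h
  · omega
  · split at h
    · exact absurd h id
    · exact ⟨inSub_ge h, h⟩

theorem inSub_child {s p c : Nat} (h : inSub s p) (hc : par c = p) (hcp : p < c) : inSub s c := by
  have := inSub_ge h
  rw [inSub]
  split
  · trivial
  · split
    · omega
    · rwa [hc]

-- hget facts
theorem hget_set_self {l : List Int} {i : Nat} (h : i < l.length) (v : Int) :
    hget (l.set i v) i = v := by
  simp [hget, List.getD, h]

theorem hget_set_ne (l : List Int) {i j : Nat} (h : i ≠ j) (v : Int) :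
    hget (l.set i v) j = hget l j := by
  simp [hget, List.getD, List.getElem?_set_ne h]

theorem hget_append_lt {l : List Int} {i : Nat} (h : i < l.length) (t : List Int) :
    hget (l ++ t) i = hget l i := by
  simp [hget, List.getD, List.getElem?_append_left h]

theorem hget_append_self (l : List Int) (v : Int) : hget (l ++ [v]) l.length = v := by
  simp [hget, List.getD]

theorem hget_mem {l : List Int} {i : Nat} (h : i < l.length) : hget l i ∈ l := by
  simp only [hget, List.getD, List.getElem?_eq_getElem h, Option.getD_some]
  exact List.getElem_mem h

theorem hget_dropLast {l : List Int} {i : Nat} (h : i < l.length - 1) :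
    hget l.dropLast i = hget l i := by
  simp only [hget, List.getD, List.getElem?_dropLast, if_pos h]

-- the multiset effect of l.set
theorem perm_set {l : List Int} {i : Nat} (h : i < l.length) (v : Int) :
    (hget l i :: l.set i v).Perm (v :: l) := by
  induction l generalizing i with
  | nil => simp at h
  | cons a t ih =>
    cases i with
    | zero => simpa [hget] using List.Perm.swap v a t
    | succ n =>
      have hn : n < t.length := by simpa using h
      have : hget (a :: t) (n + 1) = hget t n := by simp [hget]
      rw [this, List.set_cons_succ]
      have h1 : (hget t n :: a :: t.set n v).Perm (a :: hget t n :: t.set n v) :=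
        List.Perm.swap a (hget t n) _
      have h2 : (a :: hget t n :: t.set n v).Perm (a :: v :: t) := (ih hn).cons a
      have h3 : (a :: v :: t).Perm (v :: a :: t) := List.Perm.swap v a t
      exact (h1.trans h2).trans h3

-- basic facts about par and childSel
theorem par_le (x : Nat) : par x ≤ x := by unfold par; omega

theorem childSel_gt (l : List Int) (pos : Nat) : pos < childSel l pos := by
  unfold childSel; split <;> omega

theorem childSel_lt {l : List Int} {pos : Nat} (h : 2 * pos + 1 < l.length) :
    childSel l pos < l.length := by
  unfold childSel; split
  · rename_i hc; exact hc.1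
  · exact h

theorem childSel_par (l : List Int) (pos : Nat) : par (childSel l pos) = pos := by
  unfold childSel par; split <;> omega

theorem childSel_min {l : List Int} {pos : Nat} (h : 2 * pos + 1 < l.length) :
    ∀ o, 0 < o → o < l.length → par o = pos → hget l (childSel l pos) ≤ hget l o := by
  intro o ho0 holen hpar
  have ho : o = 2 * pos + 1 ∨ o = 2 * pos + 1 + 1 := by unfold par at hpar; omega
  unfold childSel
  split
  · rename_i hcond
    rcases ho with ho | ho <;> subst ho
    · exact not_lt.mp hcond.2
    · exact le_refl _
  · rename_i hcond
    rcases ho with ho | ho <;> subst ho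
    · exact le_refl _
    · have hlt : hget l (2 * pos + 1) < hget l (2 * pos + 1 + 1) := by
        by_contra hc; exact hcond ⟨by omega, hc⟩
      exact le_of_lt hlt

theorem hget_eq_getElem {l : List Int} {i : Nat} (h : i < l.length) : hget l i = l[i] := by
  simp [hget, List.getD, List.getElem?_eq_getElem h]

theorem isHeapFrom_nil (s : Nat) : IsHeapFrom [] s := by
  intro j _ hjl _; simp at hjl

-- the common permutation-rotation step of both sift loops
theorem perm_chain {l R : List Int} {pos : Nat} {v c : Int} (h : pos < l.length)
    (IH : (c :: R).Perm (v :: l.set pos c)) :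
    (hget l pos :: R).Perm (v :: l) := by
  have t1 : (c :: hget l pos :: R).Perm (hget l pos :: c :: R) := List.Perm.swap (hget l pos) c R
  have t2 := IH.cons (hget l pos)
  have t3 : (hget l pos :: v :: l.set pos c).Perm (v :: hget l pos :: l.set pos c) :=
    List.Perm.swap v (hget l pos) _
  have t4 := (perm_set h c).cons v
  have t5 : (v :: c :: l).Perm (c :: v :: l) := List.Perm.swap c v l
  exact ((((t1.trans t2).trans t3).trans t4).trans t5).cons_inv

-- ---- siftdownLoop ----
theorem sd_perm (l : List Int) (s pos : Nat) (v : Int) (h : pos < l.length) :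
    (hget l pos :: siftdownLoop l s pos v).Perm (v :: l) := by
  induction pos using Nat.strong_induction_on generalizing l with
  | _ pos ih =>
    rw [siftdownLoop]
    split
    · rename_i hsp
      split
      · rename_i hvp
        have hpplt : (pos - 1) / 2 < pos := by omega
        have h2 : (pos - 1) / 2 < (l.set pos (hget l ((pos - 1) / 2))).length := by
          simp; omega
        have IH := ih ((pos - 1) / 2) hpplt (l.set pos (hget l ((pos - 1) / 2))) h2
        rw [hget_set_ne l (by omega) _] at IH
        exact perm_chain h IH
      · exact perm_set h v
    · exact perm_set h v

theorem sd_heap (l : List Int) (s pos : Nat) (v : Int)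
    (hlen : pos < l.length) (hsub : inSub s pos)
    (ha : ∀ j, 0 < j → j < l.length → s ≤ par j → j ≠ pos → par j ≠ pos →
      hget l (par j) ≤ hget l j)
    (hb : ∀ c, 0 < c → c < l.length → par c = pos →
      v ≤ hget l c ∧ (s < pos → hget l (par pos) ≤ hget l c)) :
    IsHeapFrom (siftdownLoop l s pos v) s := by
  induction pos using Nat.strong_induction_on generalizing l with
  | _ pos ih =>
    rw [siftdownLoop]
    split
    · rename_i hsp
      split
      · rename_i hvp
        -- recursive case: hole moves to pp := (pos-1)/2
        refine ih ((pos - 1) / 2) (by omega) (l.set pos (hget l ((pos - 1) / 2)))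
          (by simp; omega) ((inSub_step hsub (by omega)).2) ?_ ?_
        · -- ha for the new hole pp
          intro j hj0 hjlen hsj hjne hpne
          simp only [List.length_set] at hjlen
          have hppar : par pos = (pos - 1) / 2 := rfl
          by_cases hjpos : j = pos
          · exact absurd (hjpos ▸ hppar) hpne
          · by_cases hpj : par j = pos
            · rw [hpj, hget_set_self hlen, hget_set_ne l (fun hc => hjpos hc.symm)]
              exact (hb j hj0 hjlen hpj).2 hsp
            · rw [hget_set_ne l (fun hc => hpj hc.symm), hget_set_ne l (fun hc => hjpos hc.symm)]
              exact ha j hj0 hjlen hsj hjpos hpj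
        · -- hb for the new hole pp
          intro c hc0 hclen hparc
          simp only [List.length_set] at hclen
          have hsub' := (inSub_step hsub (by omega)).2
          have hspp : s ≤ (pos - 1) / 2 := inSub_ge hsub'
          have hppltpos : (pos - 1) / 2 < pos := by omega
          -- the useful edge: hget l (par pp) ≤ hget l pp, valid whenever s < pp
          have hparpos : par pos = (pos - 1) / 2 := rfl
          have hparpp : par ((pos - 1) / 2) = ((pos - 1) / 2 - 1) / 2 := rfl
          have hedge : s < (pos - 1) / 2 → hget l (par ((pos - 1) / 2)) ≤ hget l ((pos - 1) / 2) := by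
            intro hspp'
            refine ha ((pos - 1) / 2) (by omega) (by omega)
              ((inSub_step hsub' (by omega)).1) (by omega) (by omega)
          by_cases hcpos : c = pos
          · subst hcpos
            constructor
            · rw [hget_set_self hlen]; exact le_of_lt hvp
            · intro hspp'
              rw [hget_set_self hlen,
                hget_set_ne l (by unfold par; omega)]
              exact hedge hspp'
          · have hgc : hget (l.set pos (hget l ((pos - 1) / 2))) c = hget l c :=
              hget_set_ne l (fun hc => hcpos hc.symm) _
            have hcc : hget l ((pos - 1) / 2) ≤ hget l c := by
              have hx := ha c hc0 hclen (by rw [hparc]; exact hspp) hcpos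
                (by rw [hparc]; omega)
              rwa [hparc] at hx
            constructor
            · rw [hgc]; exact le_of_lt (lt_of_lt_of_le hvp hcc)
            · intro hspp'
              rw [hgc, hget_set_ne l (by unfold par; omega)]
              exact (hedge hspp').trans hcc
      · -- break: parent ≤ newitem
        rename_i hvp
        intro j hj0 hjlen hsj
        simp only [List.length_set] at hjlen
        by_cases hjpos : j = pos
        · subst hjpos
          rw [hget_set_self hlen, hget_set_ne l (by unfold par; omega)]
          exact not_lt.mp hvp
        · by_cases hpj : par j = pos
          · rw [hpj, hget_set_self hlen, hget_set_ne l (fun hc => hjpos hc.symm)]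
            exact (hb j hj0 hjlen hpj).1
          · rw [hget_set_ne l (fun hc => hpj hc.symm), hget_set_ne l (fun hc => hjpos hc.symm)]
            exact ha j hj0 hjlen hsj hjpos hpj
    · -- loop never entered: pos ≤ startpos, so pos = s
      rename_i hsp
      have hspos : s = pos := le_antisymm (inSub_ge hsub) (by omega)
      intro j hj0 hjlen hsj
      simp only [List.length_set] at hjlen
      by_cases hjpos : j = pos
      · exfalso; have := par_le j; unfold par at hsj; omega
      · by_cases hpj : par j = pos
        · rw [hpj, hget_set_self hlen, hget_set_ne l (fun hc => hjpos hc.symm)]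
          exact (hb j hj0 hjlen hpj).1
        · rw [hget_set_ne l (fun hc => hpj hc.symm), hget_set_ne l (fun hc => hjpos hc.symm)]
          exact ha j hj0 hjlen hsj hjpos hpj

-- ---- siftupLoop ----
theorem su_perm (l : List Int) (s pos : Nat) (v : Int) (h : pos < l.length) :
    (hget l pos :: siftupLoop l s pos v).Perm (v :: l) := by
  generalize hn : l.length - pos = n
  induction n using Nat.strong_induction_on generalizing l pos with
  | _ n ih =>
    rw [siftupLoop]
    split
    · rename_i hcp
      have hgt := childSel_gt l pos
      have hlt := childSel_lt hcp
      have IH := ih ((l.set pos (hget l (childSel l pos))).length - childSel l pos)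
        (by simp; omega) (l.set pos (hget l (childSel l pos))) (childSel l pos)
        (by simp; omega) rfl
      rw [hget_set_ne l (by omega) _] at IH
      exact perm_chain h IH
    · have hsd := sd_perm (l.set pos v) s pos v (by simpa using h)
      rw [hget_set_self h v] at hsd
      exact (hsd.cons_inv.cons (hget l pos)).trans (perm_set h v)

theorem su_heap (l : List Int) (s pos : Nat) (v : Int)
    (hlen : pos < l.length) (hsub : inSub s pos)
    (ha : ∀ j, 0 < j → j < l.length → s ≤ par j → j ≠ pos → par j ≠ pos →
      hget l (par j) ≤ hget l j)
    (hc : ∀ c, 0 < c → c < l.length → par c = pos → s < pos →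
      hget l (par pos) ≤ hget l c) :
    IsHeapFrom (siftupLoop l s pos v) s := by
  generalize hn : l.length - pos = n
  induction n using Nat.strong_induction_on generalizing l pos with
  | _ n ih =>
    rw [siftupLoop]
    split
    · rename_i hcp
      have hgt := childSel_gt l pos
      have hclt := childSel_lt hcp
      have hcpar := childSel_par l pos
      refine ih ((l.set pos (hget l (childSel l pos))).length - childSel l pos)
        (by simp; omega) (l.set pos (hget l (childSel l pos))) (childSel l pos)
        (by simp; omega) (inSub_child hsub hcpar hgt) ?_ ?_ rfl
      · -- ha for the new hole childSel l pos
        intro j hj0 hjlen hsj hjne hpne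
        simp only [List.length_set] at hjlen
        by_cases hjpos : j = pos
        · subst hjpos
          have hparlt : par j < j := by unfold par at *; omega
          rw [hget_set_self hlen, hget_set_ne l (by omega)]
          by_cases hsp : s < j
          · exact hc (childSel l j) (by omega) hclt hcpar hsp
          · exfalso; omega
        · by_cases hpj : par j = pos
          · rw [hpj, hget_set_self hlen, hget_set_ne l (fun hcn => hjpos hcn.symm)]
            exact childSel_min hcp j hj0 hjlen hpj
          · rw [hget_set_ne l (fun hcn => hpj hcn.symm), hget_set_ne l (fun hcn => hjpos hcn.symm)]
            exact ha j hj0 hjlen hsj hjpos hpj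
      · -- hc for the new hole childSel l pos
        intro d hd0 hdlen hpard hsc
        simp only [List.length_set] at hdlen
        have hdgt : childSel l pos < d := by unfold par at hpard; omega
        rw [hcpar, hget_set_self hlen, hget_set_ne l (by omega)]
        have := ha d hd0 hdlen (by omega) (by omega) (by omega)
        rwa [hpard] at this
    · -- leaf reached: write newitem and sift it back up towards startpos
      rename_i hcp
      apply sd_heap (l.set pos v) s pos v (by simpa using hlen) hsub
      · intro j hj0 hjlen hsj hjne hpne
        simp only [List.length_set] at hjlen
        rw [hget_set_ne l (fun hcn => hpne hcn.symm), hget_set_ne l (fun hcn => hjne hcn.symm)]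
        exact ha j hj0 hjlen hsj hjne hpne
      · intro c hc0 hclen hpc
        exfalso
        simp only [List.length_set] at hclen
        unfold par at hpc; omega

-- ---- siftup ----
theorem siftup_id_of_ge {l : List Int} {pos : Nat} (h : l.length ≤ pos) : siftup l pos = l := by
  rw [siftup, siftupLoop]
  rw [dif_neg (by omega)]
  rw [siftdownLoop]
  rw [dif_neg (by omega)]
  rw [List.set_eq_of_length_le (by simpa using h), List.set_eq_of_length_le h]

theorem siftup_perm (l : List Int) (pos : Nat) : (siftup l pos).Perm l := by
  by_cases h : pos < l.length
  · exact (su_perm l pos pos (hget l pos) h).cons_inv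
  · rw [siftup_id_of_ge (by omega)]

theorem siftup_heap (l : List Int) (pos : Nat) (h : IsHeapFrom l (pos + 1)) :
    IsHeapFrom (siftup l pos) pos := by
  by_cases hlt : pos < l.length
  · refine su_heap l pos pos (hget l pos) hlt (inSub_self pos) ?_ ?_
    · intro j hj0 hjlen hsj hjne hpne
      exact h j hj0 hjlen (by omega)
    · intro c _ _ _ hss; omega
  · rw [siftup_id_of_ge (by omega)]
    intro j hj0 hjlen hsj
    exfalso; have := par_le j; unfold par at hsj; omega

-- ---- heapify ----
theorem heapifyAux_perm (k : Nat) :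
    ∀ l : List Int, (((List.range k).reverse.foldl (fun h i => siftup h i) l)).Perm l := by
  induction k with
  | zero => intro l; simp
  | succ k ih =>
    intro l
    rw [List.range_succ, List.reverse_append]
    simpa using (ih (siftup l k)).trans (siftup_perm l k)

theorem heapifyAux_heap (k : Nat) :
    ∀ l : List Int, IsHeapFrom l k →
      IsHeapFrom ((List.range k).reverse.foldl (fun h i => siftup h i) l) 0 := by
  induction k with
  | zero => intro l h; simpa using h
  | succ k ih =>
    intro l h
    rw [List.range_succ, List.reverse_append]
    simpa using ih (siftup l k) (siftup_heap l k h)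

theorem heapify_perm (l : List Int) : (heapify l).Perm l := by
  rw [heapify]; exact heapifyAux_perm _ l

theorem heapify_heap (l : List Int) : IsHeapFrom (heapify l) 0 := by
  rw [heapify]
  refine heapifyAux_heap _ l ?_
  intro j hj0 hjl hsj
  exfalso; unfold par at hsj; omega

-- ---- heappush ----
theorem heappush_perm (l : List Int) (v : Int) : (heappush l v).Perm (v :: l) := by
  rw [heappush, siftdown, hget_append_self]
  have h := sd_perm (l ++ [v]) 0 l.length v (by simp)
  rw [hget_append_self] at h
  exact h.cons_inv.trans (List.perm_append_singleton v l)

theorem heappush_heap (l : List Int) (v : Int) (h : IsHeapFrom l 0) :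
    IsHeapFrom (heappush l v) 0 := by
  rw [heappush, siftdown, hget_append_self]
  refine sd_heap (l ++ [v]) 0 l.length v (by simp) (inSub_zero _) ?_ ?_
  · intro j hj0 hjlen hsj hjne hpne
    simp only [List.length_append, List.length_cons, List.length_nil] at hjlen
    have hj : j < l.length := by omega
    have hpj : par j < l.length := by have := par_le j; omega
    rw [hget_append_lt hj, hget_append_lt hpj]
    exact h j hj0 hj (Nat.zero_le _)
  · intro c hc0 hclen hpc
    exfalso
    simp only [List.length_append, List.length_cons, List.length_nil] at hclen
    unfold par at hpc; omega

-- ---- heappop ----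
theorem heappop_perm (l : List Int) (h : l ≠ []) : (hget l 0 :: heappop l).Perm l := by
  rw [heappop]
  split
  · rename_i hr
    have hlen2 : 2 ≤ l.length := by
      rcases l with _ | ⟨a, _ | ⟨b, t⟩⟩ <;> simp_all
    have h0 : 0 < l.dropLast.length := by simp; omega
    have hgl : hget l 0 = hget l.dropLast 0 := (hget_dropLast (by simp; omega)).symm
    have hsp := (siftup_perm (l.dropLast.set 0 (hget l (l.length - 1))) 0).cons (hget l 0)
    refine hsp.trans ?_
    rw [hgl]
    refine (perm_set h0 (hget l (l.length - 1))).trans ?_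
    have hgetlast : hget l (l.length - 1) = l.getLast h := by
      rw [hget_eq_getElem (by omega), List.getLast_eq_getElem]
    rw [hgetlast]
    have hx : l.dropLast ++ [l.getLast h] = l := List.dropLast_append_getLast h
    calc (l.getLast h :: l.dropLast).Perm (l.dropLast ++ [l.getLast h]) :=
          (List.perm_append_singleton _ _).symm
      _ = l := hx
  · rename_i hr
    rw [not_ne_iff] at hr
    rw [hr]
    rcases l with _ | ⟨a, t⟩
    · exact absurd rfl h
    · rcases t with _ | ⟨b, t2⟩
      · exact List.Perm.refl _
      · simp at hr

theorem heappop_heap (l : List Int) (h : l ≠ []) (hh : IsHeapFrom l 0) :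
    IsHeapFrom (heappop l) 0 := by
  rw [heappop]
  split
  · rename_i hr
    have hlen2 : 2 ≤ l.length := by
      rcases l with _ | ⟨a, _ | ⟨b, t⟩⟩ <;> simp_all
    have hfix := siftup_heap (l.dropLast.set 0 (hget l (l.length - 1))) 0 ?_
    · simpa using hfix
    · intro j hj0 hjl hsj
      simp only [List.length_set, List.length_dropLast] at hjl
      have hpar0 : 0 < par j := hsj
      have hparlt : par j < j := by unfold par; omega
      rw [hget_set_ne _ (by omega), hget_set_ne _ (by omega),
        hget_dropLast (by omega), hget_dropLast (by omega)]
      exact hh j hj0 (by omega) (Nat.zero_le _)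
  · rename_i hr
    rw [not_ne_iff] at hr
    rw [hr]
    exact isHeapFrom_nil 0

-- ---- root is the minimum ----
theorem root_min {l : List Int} (hh : IsHeapFrom l 0) :
    ∀ j, j < l.length → hget l 0 ≤ hget l j := by
  intro j
  induction j using Nat.strong_induction_on with
  | _ j ih =>
    intro hj
    rcases Nat.eq_zero_or_pos j with h0 | h0
    · rw [h0]
    · have hp : par j < j := by unfold par; omega
      exact le_trans (ih (par j) hp (lt_trans hp hj)) (hh j h0 hj (Nat.zero_le _))

-- ---- extrema only depend on the multiset ----
theorem max?_eq_of_perm {l l' : List Int} (h : l.Perm l') :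
    PySem.List.max? l (fun x => x) = PySem.List.max? l' (fun x => x) := by
  cases hl : PySem.List.max? l (fun x => x) with
  | none =>
    rw [PySem.List.max?_eq_none_iff] at hl
    rw [eq_comm, PySem.List.max?_eq_none_iff]
    exact (hl ▸ h).symm.eq_nil
  | some m =>
    cases hl' : PySem.List.max? l' (fun x => x) with
    | none =>
      rw [PySem.List.max?_eq_none_iff] at hl'
      rw [hl'] at h
      rw [h.eq_nil] at hl
      simp [PySem.List.max?] at hl
    | some m' =>
      have h1 : m ≤ m' := PySem.List.max?_isMax hl' m (h.mem_iff.mp (PySem.List.max?_mem hl))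
      have h2 : m' ≤ m := PySem.List.max?_isMax hl m' (h.mem_iff.mpr (PySem.List.max?_mem hl'))
      rw [le_antisymm h1 h2]

theorem min?_eq_of_perm {l l' : List Int} (h : l.Perm l') :
    PySem.List.min? l (fun x => x) = PySem.List.min? l' (fun x => x) := by
  cases hl : PySem.List.min? l (fun x => x) with
  | none =>
    rw [PySem.List.min?_eq_none_iff] at hl
    rw [eq_comm, PySem.List.min?_eq_none_iff]
    exact (hl ▸ h).symm.eq_nil
  | some m =>
    cases hl' : PySem.List.min? l' (fun x => x) with
    | none =>
      rw [PySem.List.min?_eq_none_iff] at hl'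
      rw [hl'] at h
      rw [h.eq_nil] at hl
      simp [PySem.List.min?] at hl
    | some m' =>
      have h1 : m ≤ m' := PySem.List.min?_isMin hl m' (h.mem_iff.mpr (PySem.List.min?_mem hl'))
      have h2 : m' ≤ m := PySem.List.min?_isMin hl' m (h.mem_iff.mp (PySem.List.min?_mem hl))
      rw [le_antisymm h1 h2]

-- ---- the loop bodies preserve the coupling invariant ----
theorem step_equiv (heap vals : List Int) (op : String)
    (hh : IsHeapFrom heap 0) (hp : heap.Perm vals) :
    IsHeapFrom (stepA heap op) 0 ∧ (stepA heap op).Perm (stepB vals op) := by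
  unfold stepA stepB
  by_cases hI : PySem.List.pyGetD ((PySem.Str.split? op " ").getD []) 0 "" = "I"
  · rw [if_pos hI, if_pos hI]
    cases PySem.List.pyGet? ((PySem.Str.split? op " ").getD []) 1 with
    | none => exact ⟨hh, hp⟩
    | some str =>
      dsimp only
      cases PySem.Int.ofStr? str with
      | none => exact ⟨hh, hp⟩
      | some v =>
        dsimp only
        rw [show dpqPush heap v = heappush heap v from rfl]
        exact ⟨heappush_heap heap v hh,
          (heappush_perm heap v).trans ((hp.cons v).trans (List.perm_append_singleton v vals).symm)⟩
  · rw [if_neg hI, if_neg hI]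
    by_cases hD : PySem.List.pyGetD ((PySem.Str.split? op " ").getD []) 0 "" = "D"
    · rw [if_pos hD]
      by_cases hv : vals = []
      · have hE : heap = [] := by
          refine List.eq_nil_of_length_eq_zero ?_
          rw [hp.length_eq, hv]; rfl
        rw [if_neg (fun hcn => hcn.2 hv)]
        subst hE
        cases PySem.List.pyGet? ((PySem.Str.split? op " ").getD []) 1 with
        | none => exact ⟨hh, hp⟩
        | some str =>
          dsimp only
          split_ifs <;> exact ⟨hh, hp⟩
      · have hne : heap ≠ [] := by
          intro hcn
          refine hv (List.eq_nil_of_length_eq_zero ?_)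
          rw [← hp.length_eq, hcn]; rfl
        rw [if_pos ⟨hD, hv⟩]
        cases PySem.List.pyGet? ((PySem.Str.split? op " ").getD []) 1 with
        | none => exact ⟨hh, hp⟩
        | some str =>
          dsimp only
          by_cases hs1 : str = "-1"
          · rw [if_pos hs1, if_pos hs1]
            obtain ⟨m, hm⟩ := Option.ne_none_iff_exists'.mp
              (show PySem.List.min? vals (fun x => x) ≠ none by
                rw [Ne, PySem.List.min?_eq_none_iff]; exact hv)
            rw [hm]
            dsimp only
            have hmem : m ∈ vals := PySem.List.min?_mem hm
            rw [PySem.List.remove?_eq_some_erase vals m hmem, Option.getD_some]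
            rw [show dpqPopMin heap = heappop heap from by rw [dpqPopMin, if_neg hne]]
            have hroot : hget heap 0 = m := by
              apply le_antisymm
              · obtain ⟨i, hlt, heq⟩ := List.mem_iff_getElem.mp (hp.mem_iff.mpr hmem)
                calc hget heap 0 ≤ hget heap i := root_min hh i hlt
                  _ = m := by rw [hget_eq_getElem hlt, heq]
              · exact PySem.List.min?_isMin hm _
                  (hp.mem_iff.mp (hget_mem (List.length_pos_iff.mpr hne)))
            refine ⟨heappop_heap heap hne hh, ?_⟩
            have hstep : (hget heap 0 :: heappop heap).Perm (m :: vals.erase m) :=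
              (heappop_perm heap hne).trans (hp.trans (List.perm_cons_erase hmem))
            rw [hroot] at hstep
            exact hstep.cons_inv
          · rw [if_neg hs1, if_neg hs1]
            by_cases hs2 : str = "1"
            · rw [if_pos hs2, if_pos hs2]
              obtain ⟨M, hM⟩ := Option.ne_none_iff_exists'.mp
                (show PySem.List.max? vals (fun x => x) ≠ none by
                  rw [Ne, PySem.List.max?_eq_none_iff]; exact hv)
              rw [hM]
              dsimp only
              have hMmem : M ∈ vals := PySem.List.max?_mem hM
              rw [PySem.List.remove?_eq_some_erase vals M hMmem, Option.getD_some]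
              rw [show dpqPopMax heap
                  = heapify ((heappop (heapify (heap.map (fun x => -x)))).map (fun x => -x))
                from by rw [dpqPopMax, if_neg hne]]
              have hm1p : (heapify (heap.map (fun x => -x))).Perm (heap.map (fun x => -x)) :=
                heapify_perm _
              have hm1h : IsHeapFrom (heapify (heap.map (fun x => -x))) 0 := heapify_heap _
              have hm1ne : heapify (heap.map (fun x => -x)) ≠ [] := by
                intro hcn
                have hl2 := hm1p.length_eq
                rw [hcn] at hl2
                simp at hl2
                exact hne (List.eq_nil_of_length_eq_zero hl2.symm)
              have hMheap : M ∈ heap := hp.mem_iff.mpr hMmem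
              have hnegM : -M ∈ heapify (heap.map (fun x => -x)) :=
                hm1p.mem_iff.mpr (by exact List.mem_map_of_mem hMheap)
              have hroot : hget (heapify (heap.map (fun x => -x))) 0 = -M := by
                apply le_antisymm
                · obtain ⟨i, hlt, heq⟩ := List.mem_iff_getElem.mp hnegM
                  calc hget (heapify (heap.map (fun x => -x))) 0
                      ≤ hget (heapify (heap.map (fun x => -x))) i := root_min hm1h i hlt
                    _ = -M := by rw [hget_eq_getElem hlt, heq]
                · have hr : hget (heapify (heap.map (fun x => -x))) 0 ∈ heapify (heap.map (fun x => -x)) :=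
                    hget_mem (List.length_pos_iff.mpr hm1ne)
                  obtain ⟨x, hx, hxe⟩ := List.mem_map.mp (hm1p.mem_iff.mp hr)
                  have hxM : x ≤ M := PySem.List.max?_isMax hM x (hp.mem_iff.mp hx)
                  omega
              have h1 : (heappop (heapify (heap.map (fun x => -x)))).Perm
                  ((heap.map (fun x => -x)).erase (-M)) := by
                have h2 := (heappop_perm _ hm1ne).trans
                  (hm1p.trans (List.perm_cons_erase (List.mem_map_of_mem hMheap)))
                rw [hroot] at h2
                exact h2.cons_inv
              refine ⟨heapify_heap _, ?_⟩
              have h4 : (heap.map (fun x => -x)).erase (-M) = (heap.erase M).map (fun x => -x) :=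
                (List.map_erase (fun a b hab => by omega) heap).symm
              have h5 : ((heap.erase M).map (fun x => -x)).map (fun x => -x) = heap.erase M := by
                simp [List.map_map]
              refine ((heapify_perm _).trans ((h1.map _).trans ?_)).trans (hp.erase M)
              rw [h4, h5]
            · rw [if_neg hs2, if_neg hs2]
              exact ⟨hh, hp⟩
    · rw [if_neg hD, if_neg (fun hcn => hD hcn.1)]
      exact ⟨hh, hp⟩

theorem fold_equiv (ops : List String) (heap vals : List Int)
    (hh : IsHeapFrom heap 0) (hp : heap.Perm vals) :
    IsHeapFrom (ops.foldl stepA heap) 0 ∧ (ops.foldl stepA heap).Perm (ops.foldl stepB vals) := by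
  induction ops generalizing heap vals with
  | nil => exact ⟨hh, hp⟩
  | cons op rest ih =>
    obtain ⟨h1, h2⟩ := step_equiv heap vals op hh hp
    exact ih _ _ h1 h2

-- ===== VERDICT (by name: the statement is the Claim_ definition above) =====
theorem solution_spec : Claim_equal_solution := by
  intro operations _hdom _hpre
  unfold Spec_solution solution solution_alt
  obtain ⟨_, hperm⟩ := fold_equiv operations [] [] (by intro j hj hl; simp at hl) (List.Perm.refl [])
  have hlen := hperm.length_eq
  by_cases hnil : operations.foldl stepA [] = []
  · have hB : operations.foldl stepB [] = [] := by
      have hl2 := hperm.length_eq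
      rw [hnil] at hl2
      exact List.eq_nil_of_length_eq_zero (by simpa using hl2.symm)
    simp [hnil, hB]
  · have hB : operations.foldl stepB [] ≠ [] := by
      intro hc; apply hnil; apply List.eq_nil_of_length_eq_zero; rw [hc] at hlen; simpa using hlen
    have hL : (operations.foldl stepA []).length ≠ 0 := by
      simpa [List.length_eq_zero_iff] using hnil
    simp only [if_neg hL, if_neg hB, max?_eq_of_perm hperm, min?_eq_of_perm hperm]
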